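-- pv_equiv track=rewrite | github.com/hung8110999/AI_CryptarithmeticProblem | readFile.py | is_valid_cryptarithmetic_string
-- ===== SOURCE A (Python) =====
-- def is_valid_cryptarithmetic_string(s):
--     allowed_characters = set("ABCDEFGHIJKLMNOPQRSTUVWXYZ")
--     allowed_operators = set("(+-*=)")
--
--     # Function to check if a given expression is valid (contains only allowed characters and operators).
--     def is_valid_expression(expression):
--         stack = []
--         for i, char in enumerate(expression):
--             if char in allowed_operators:
--                 if char == '(':
--                     stack.append(char)
--                 elif char == ')':
--                     if not stack or stack[-1] != '(':
--                         return False
--                     stack.pop()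
--             elif char not in allowed_characters and char != ' ':
--                 return False
--
--             # Check for invalid character-parentheses combinations like a)b or a(b)
--             if i < len(expression) - 2:
--                 if expression[i] in allowed_characters and expression[i + 1] == ')' and expression[
--                     i + 2] in allowed_characters:
--                     return False
--                 if expression[i] in allowed_characters and expression[i + 1] == '(' and expression[
--                     i + 2] in allowed_characters:
--                     return False
--
--         return len(stack) == 0  # Check if all parentheses are balanced.
--
--     # Split the input string by "=" to get the left and right parts of the equation.
--     parts = s.split("=")
--
--     # Ensure there is exactly one "=" in the string.
--     if len(parts) != 2:
--         return False
--
--     left_part = parts[0].strip()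
--     right_part = parts[1].strip()
--
--     # Check if the left and right parts are valid expressions.
--     if not is_valid_expression(left_part) or not is_valid_expression(right_part):
--         return False
--
--     # Check if the left part has at least one operator and the right part has no operators.
--     if all(char not in allowed_operators for char in left_part) or any(
--             char in allowed_operators for char in right_part):
--         return False
--
--     return True
-- ===== SOURCE B (Python) =====
-- def is_valid_cryptarithmetic_string(s):
--     letters = "ABCDEFGHIJKLMNOPQRSTUVWXYZ"
--     ops = "(+-*=)"
--
--     # pass 1: every character is a letter, an operator or a space
--     def chars_ok(e):
--         return all(c in letters or c in ops or c == ' ' for c in e)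
--
--     # pass 2: parenthesis balance with a counter, never negative, zero at the end
--     def balance_ok(e):
--         depth = 0
--         for c in e:
--             if c == '(':
--                 depth += 1
--             elif c == ')':
--                 depth -= 1
--                 if depth < 0:
--                     return False
--         return depth == 0
--
--     # pass 3: no letter-parenthesis-letter window
--     def triples_ok(e):
--         return all(not (a in letters and b in "()" and c in letters)
--                    for a, b, c in zip(e, e[1:], e[2:]))
--
--     def valid_expr(e):
--         return chars_ok(e) and balance_ok(e) and triples_ok(e)
--
--     parts = s.split("=")
--     if len(parts) != 2:
--         return False
--     left = parts[0].strip()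
--     right = parts[1].strip()
--     if not (valid_expr(left) and valid_expr(right)):
--         return False
--     return any(c in ops for c in left) and all(c not in ops for c in right)
-- ===== Notes on version B (the rewrite author's own statement) =====
-- stated objective: simpler
-- what changed: A's single combined loop with a list used as a parenthesis stack and per-iteration early returns is replaced by three independent linear passes: an allowed-character check, an integer depth counter for parenthesis balance, and a zip-of-three-shifted-views scan for letter-parenthesis-letter windows.
import Mathlib
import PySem

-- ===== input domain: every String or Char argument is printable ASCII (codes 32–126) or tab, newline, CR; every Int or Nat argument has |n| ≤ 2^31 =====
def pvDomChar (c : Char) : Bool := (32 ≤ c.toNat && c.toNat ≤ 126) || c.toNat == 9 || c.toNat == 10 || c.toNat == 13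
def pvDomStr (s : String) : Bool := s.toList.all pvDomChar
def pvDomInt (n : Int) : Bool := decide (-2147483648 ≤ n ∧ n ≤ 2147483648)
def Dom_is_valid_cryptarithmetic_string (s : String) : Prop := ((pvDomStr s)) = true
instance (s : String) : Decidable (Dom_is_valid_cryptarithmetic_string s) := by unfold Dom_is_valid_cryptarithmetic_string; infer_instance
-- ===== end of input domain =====

-- B replaces A's combined stack-and-window loop by three independent linear passes (simpler decomposition, same cost).

-- ===== PORT A =====
def pvLettersA : PySem.Set Char := PySem.Set.ofList "ABCDEFGHIJKLMNOPQRSTUVWXYZ".toList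
def pvOpsA : PySem.Set Char := PySem.Set.ofList "(+-*=)".toList

-- the two 'invalid character-parentheses combination' ifs of A's loop body (fires only when i < len-2)
def pvACheck (c : Char) (rest : List Char) : Bool :=
  match rest with
  | c2 :: c3 :: _ =>
    if PySem.Set.contains pvLettersA c && c2 == ')' && PySem.Set.contains pvLettersA c3 then true
    else if PySem.Set.contains pvLettersA c && c2 == '(' && PySem.Set.contains pvLettersA c3 then true
    else false
  | _ => false

-- the operator/letter handling of one iteration: none = 'return False', some = updated stack
def pvAStep (c : Char) (stack : List Char) : Option (List Char) :=
  if PySem.Set.contains pvOpsA c then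
    if c == '(' then some (c :: stack)
    else if c == ')' then
      if stack.isEmpty || !(stack.head? == some '(') then none else some stack.tail
    else some stack
  else if !(PySem.Set.contains pvLettersA c) && !(c == ' ') then none
  else some stack

def pvAGo (l : List Char) (stack : List Char) : Bool :=
  match l with
  | [] => stack.isEmpty
  | c :: rest =>
    match pvAStep c stack with
    | none => false
    | some st => if pvACheck c rest then false else pvAGo rest st

def pvAValidExpr (e : List Char) : Bool := pvAGo e []

def is_valid_cryptarithmetic_string (s : String) : Bool :=
  -- 'parts = s.split("="); if len(parts) != 2: return False' ported as a match on the two-element shape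
  match PySem.Chars.splitOn s.toList "=".toList with
  | [p0, p1] =>
    let left := PySem.Chars.strip p0
    let right := PySem.Chars.strip p1
    if !(pvAValidExpr left) || !(pvAValidExpr right) then false
    else if left.all (fun c => !(PySem.Set.contains pvOpsA c))
         || right.any (fun c => PySem.Set.contains pvOpsA c) then false
    else true
  | _ => false

-- ===== PORT B =====
def pvLettersB : List Char := "ABCDEFGHIJKLMNOPQRSTUVWXYZ".toList
def pvOpsB : List Char := "(+-*=)".toList

def pvBCharsOk (e : List Char) : Bool :=
  e.all (fun c => pvLettersB.contains c || pvOpsB.contains c || c == ' ')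

def pvBBalance (e : List Char) (depth : Int) : Bool :=
  match e with
  | [] => depth == 0
  | c :: rest =>
    if c == '(' then pvBBalance rest (depth + 1)
    else if c == ')' then
      if depth - 1 < 0 then false else pvBBalance rest (depth - 1)
    else pvBBalance rest depth

def pvBTriplesOk (e : List Char) : Bool :=
  (e.zip (e.tail.zip e.tail.tail)).all
    (fun t => !(pvLettersB.contains t.1 && "()".toList.contains t.2.1 && pvLettersB.contains t.2.2))

def pvBValidExpr (e : List Char) : Bool :=
  pvBCharsOk e && pvBBalance e 0 && pvBTriplesOk e

def is_valid_cryptarithmetic_string_alt (s : String) : Bool :=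
  let parts := PySem.Chars.splitOn s.toList "=".toList
  if parts.length ≠ 2 then false
  else
    let left := PySem.Chars.strip (parts.headD [])
    let right := PySem.Chars.strip (parts.tail.headD [])
    if !(pvBValidExpr left && pvBValidExpr right) then false
    else left.any (fun c => pvOpsB.contains c) && right.all (fun c => !(pvOpsB.contains c))

-- ===== PRECONDITION & SPEC =====
def Spec_is_valid_cryptarithmetic_string (s : String) (out : Bool) : Prop := out = is_valid_cryptarithmetic_string_alt s
instance (s : String) (out : Bool) : Decidable (Spec_is_valid_cryptarithmetic_string s out) := by unfold Spec_is_valid_cryptarithmetic_string; infer_instance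

-- ===== CLAIM (what is proved, stated in full; the proofs are below) =====
def Claim_equal_is_valid_cryptarithmetic_string : Prop := ∀ (s : String), Dom_is_valid_cryptarithmetic_string s → Spec_is_valid_cryptarithmetic_string s (is_valid_cryptarithmetic_string s)

-- ===== LEMMAS AND PROOFS =====

lemma mem_opsA (c : Char) : c ∈ pvOpsA ↔ c ∈ pvOpsB := by
  rw [show (pvOpsA : List Char) = pvOpsB from by decide]

lemma mem_lettersA (c : Char) : c ∈ pvLettersA ↔ c ∈ pvLettersB := by
  rw [show (pvLettersA : List Char) = pvLettersB from by decide]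

lemma contains_opsA (c : Char) : PySem.Set.contains pvOpsA c = pvOpsB.contains c := by
  rw [show pvOpsA = (pvOpsB : PySem.Set Char) from by decide]
  simp [PySem.Set.contains_eq_listContains]

lemma contains_lettersA (c : Char) : PySem.Set.contains pvLettersA c = pvLettersB.contains c := by
  rw [show pvLettersA = (pvLettersB : PySem.Set Char) from by decide]
  simp [PySem.Set.contains_eq_listContains]

-- B's zip-of-three scan peels off exactly A's per-position window check
lemma triples_cons (c : Char) (rest : List Char) :
    pvBTriplesOk (c :: rest) = (!(pvACheck c rest) && pvBTriplesOk rest) := by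
  match rest with
  | [] => rfl
  | [_] => rfl
  | c2 :: c3 :: r =>
    simp only [pvBTriplesOk, List.tail_cons, List.zip_cons_cons, List.all_cons, pvACheck,
      contains_lettersA]
    by_cases h1 : c2 = ')' <;> by_cases h2 : c2 = '(' <;> simp [h1, h2]

lemma go_eq (l : List Char) (n : Nat) :
    pvAGo l (List.replicate n '(') = (pvBCharsOk l && pvBBalance l (n : Int) && pvBTriplesOk l) := by
  induction l generalizing n with
  | nil =>
    cases n with
    | zero => rfl
    | succ m =>
      simp [pvAGo, pvBCharsOk, pvBBalance, pvBTriplesOk, List.replicate_succ]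
      omega
  | cons c rest ih =>
    rw [pvAGo, triples_cons]
    by_cases hpar : c = '('
    · subst hpar
      have hst : pvAStep '(' (List.replicate n '(') = some (List.replicate (n + 1) '(') := by
        simp [pvAStep, List.replicate_succ, show '(' ∈ pvOpsA from by decide]
      rw [hst]
      cases hc : pvACheck '(' rest with
      | true => simp
      | false =>
        have h := ih (n + 1)
        push_cast at h
        simp [pvBCharsOk, pvBBalance, h, pvOpsB]
    · by_cases hrp : c = ')'
      · subst hrp
        match n with
        | 0 =>
          have hst : pvAStep ')' (List.replicate 0 '(') = none := by rfl
          rw [hst]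
          simp [pvBBalance]
        | Nat.succ m =>
          have hst : pvAStep ')' (List.replicate (m + 1) '(') = some (List.replicate m '(') := by
            simp [pvAStep, List.replicate_succ, show ')' ∈ pvOpsA from by decide]
          rw [hst]
          cases hc : pvACheck ')' rest with
          | true => simp
          | false =>
            have hcast : ((m + 1 : Nat) : Int) - 1 = ((m : Nat) : Int) := by push_cast; ring
            have hlt : ¬ (((m + 1 : Nat) : Int) - 1 < 0) := by push_cast; omega
            have hm : ¬ ((m : Nat) : Int) < 0 := by omega
            simp [pvBCharsOk, pvBBalance, hm, ih m, pvOpsB]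
      · -- c is neither parenthesis
        have hb : pvBBalance (c :: rest) (n : Int) = pvBBalance rest (n : Int) := by
          simp [pvBBalance, hpar, hrp]
        by_cases hop : c ∈ pvOpsB
        · have hst : pvAStep c (List.replicate n '(') = some (List.replicate n '(') := by
            simp [pvAStep, mem_opsA, hop, hpar, hrp]
          rw [hst]
          cases hc : pvACheck c rest with
          | true => simp
          | false => simp [pvBCharsOk, hb, hop, ih n]
        · by_cases hok : c ∈ pvLettersB ∨ c = ' '
          · have hst : pvAStep c (List.replicate n '(') = some (List.replicate n '(') := by
              rcases hok with h | h <;>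
                simp [pvAStep, mem_opsA, mem_lettersA, hop, h]
            rw [hst]
            cases hc : pvACheck c rest with
            | true => simp
            | false =>
              rw [hb]
              rcases hok with h | h <;> simp [pvBCharsOk, h, ih n]
          · push Not at hok
            obtain ⟨hl, hs⟩ := hok
            have hst : pvAStep c (List.replicate n '(') = none := by
              simp [pvAStep, mem_opsA, mem_lettersA, hop, hl, hs]
            rw [hst]
            simp [pvBCharsOk, hl, hs, hop]

-- outer wrapper equality
lemma valid_eq (e : List Char) : pvAValidExpr e = pvBValidExpr e := by
  have := go_eq e 0
  simpa [pvAValidExpr, pvBValidExpr] using this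

-- ===== VERDICT (by name: the statement is the Claim_ definition above) =====
theorem is_valid_cryptarithmetic_string_spec : Claim_equal_is_valid_cryptarithmetic_string := by
  intro s _
  unfold Spec_is_valid_cryptarithmetic_string is_valid_cryptarithmetic_string is_valid_cryptarithmetic_string_alt
  match hp : PySem.Chars.splitOn s.toList "=".toList with
  | [] => rfl
  | [_] => rfl
  | p0 :: p1 :: p2 :: ps => rfl
  | [p0, p1] =>
    have hlen : ¬ (([p0, p1] : List (List Char)).length ≠ 2) := by simp
    rw [if_neg hlen]
    simp only [List.headD, List.tail_cons]
    simp only [valid_eq, contains_opsA]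
    cases hvl : pvBValidExpr (PySem.Chars.strip p0) <;>
      cases hvr : pvBValidExpr (PySem.Chars.strip p1)
    case false.false | false.true | true.false => simp
    case true.true =>
      simp only [Bool.not_true, Bool.false_or, Bool.and_self]
      have h1 : ((PySem.Chars.strip p0).all fun c => !(pvOpsB.contains c))
          = !((PySem.Chars.strip p0).any fun c => pvOpsB.contains c) := by
        rw [List.any_eq_not_all_not]; simp
      have h2 : ((PySem.Chars.strip p1).all fun c => !(pvOpsB.contains c))
          = !((PySem.Chars.strip p1).any fun c => pvOpsB.contains c) := by
        rw [List.any_eq_not_all_not]; simp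
      rw [h1, h2]
      cases (PySem.Chars.strip p0).any fun c => pvOpsB.contains c <;>
        cases (PySem.Chars.strip p1).any fun c => pvOpsB.contains c <;> simp
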